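-- pv_equiv track=rewrite | github.com/Sasha20055/python-labs | main.py | count_numbers_less_than_five
-- ===== SOURCE A (Python) =====
-- def count_numbers_less_than_five(s: str) -> int:
--     current = ''
--     count = 0
--     for char in s:
--         if char.isdigit():
--             current += char
--         else:
--             if current:
--                 num = int(current)
--                 if num < 5:
--                     count += 1
--                 current = ''
--     if current:
--         num = int(current)
--         if num < 5:
--             count += 1
--     return count
-- ===== SOURCE B (Python) =====
-- def count_numbers_less_than_five(s: str) -> int:
--     # two-phase: tokenize maximal digit runs, then count the small ones
--     tokens = ''.join(ch if ch.isdigit() else ' ' for ch in s).split()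
--     return sum(1 for tok in tokens if int(tok) < 5)
-- ===== Notes on version B (the rewrite author's own statement) =====
-- stated objective: idiomatic
-- what changed: Replaced A's interleaved char-by-char state machine (with its duplicated end-of-string flush block) by a two-phase tokenize-then-count: map non-digits to spaces, split into maximal digit runs, then sum over tokens with int(tok) < 5.
import Mathlib
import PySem

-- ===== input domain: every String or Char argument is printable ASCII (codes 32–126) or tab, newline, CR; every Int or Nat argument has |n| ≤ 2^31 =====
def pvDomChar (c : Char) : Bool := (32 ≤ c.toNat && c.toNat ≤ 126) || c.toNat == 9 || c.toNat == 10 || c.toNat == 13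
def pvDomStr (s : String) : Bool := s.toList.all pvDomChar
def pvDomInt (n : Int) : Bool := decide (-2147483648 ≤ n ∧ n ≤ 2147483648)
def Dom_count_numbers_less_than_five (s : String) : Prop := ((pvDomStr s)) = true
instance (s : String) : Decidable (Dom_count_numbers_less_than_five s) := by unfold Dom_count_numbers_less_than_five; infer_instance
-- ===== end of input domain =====

-- B replaces A's interleaved char-by-char state machine by a tokenize-then-count two-phase pass (idiomatic; same cost).

-- ===== PORT A =====
-- A's loop state: remaining chars, `current` (the digit run being built), `count`.
-- `int(current)` is ported as PySem.Int.ofChars?; it is only reached with `current` a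
-- nonempty digit run, on which it never returns none, so the none branch is unreachable.
def pvLoopA : List Char → List Char → Int → Int
  | [], cur, count =>
      if cur.isEmpty then count
      else match PySem.Int.ofChars? cur with
        | some n => if n < 5 then count + 1 else count
        | none => count
  | c :: rest, cur, count =>
      if PySem.Chars.isdigit c then pvLoopA rest (cur ++ [c]) count
      else if cur.isEmpty then pvLoopA rest cur count
      else pvLoopA rest []
        (match PySem.Int.ofChars? cur with
          | some n => if n < 5 then count + 1 else count
          | none => count)

def count_numbers_less_than_five (s : String) : Int := pvLoopA s.toList [] 0

-- ===== PORT B =====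
-- mapped = ''.join(ch if ch.isdigit() else ' ' for ch in s); tokens = mapped.split();
-- sum(1 for tok in tokens if int(tok) < 5).  int(tok) is PySem.Int.ofStr?; tokens are
-- nonempty digit runs so the getD default (5, not counted) is unreachable.
def count_numbers_less_than_five_alt (s : String) : Int :=
  let mapped := String.ofList (s.toList.map (fun ch => if PySem.Chars.isdigit ch then ch else ' '))
  (PySem.Str.split₀ mapped).foldl
    (fun acc tok => acc + (if (PySem.Int.ofStr? tok).getD 5 < 5 then 1 else 0)) 0

-- ===== PRECONDITION & SPEC =====
def Spec_count_numbers_less_than_five (s : String) (out : Int) : Prop := out = count_numbers_less_than_five_alt s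
instance (s : String) (out : Int) : Decidable (Spec_count_numbers_less_than_five s out) := by unfold Spec_count_numbers_less_than_five; infer_instance

-- ===== CLAIM (what is proved, stated in full; the proofs are below) =====
def Claim_equal_count_numbers_less_than_five : Prop := ∀ (s : String), Dom_count_numbers_less_than_five s → Spec_count_numbers_less_than_five s (count_numbers_less_than_five s)

-- ===== LEMMAS AND PROOFS =====

-- per-token contribution, shared shape of both counting steps
def pvTok (t : List Char) : Int := if (PySem.Int.ofChars? t).getD 5 < 5 then 1 else 0

def pvS (ts : List (List Char)) : Int := ts.foldl (fun acc t => acc + pvTok t) 0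

def pvF (c : Char) : Char := if PySem.Chars.isdigit c then c else ' '

lemma pvTok_eq_match (t : List Char) (count : Int) :
    (match PySem.Int.ofChars? t with
      | some n => if n < 5 then count + 1 else count
      | none => count) = count + pvTok t := by
  unfold pvTok
  cases h : PySem.Int.ofChars? t with
  | none => norm_num
  | some n =>
      simp only [Option.getD_some]
      by_cases hn : n < 5 <;> simp [hn]

lemma pvS_shift (ts : List (List Char)) (a : Int) :
    List.foldl (fun acc t => acc + pvTok t) a ts = a + pvS ts := by
  induction ts generalizing a with
  | nil => simp [pvS]
  | cons u us ih =>
      simp only [List.foldl_cons, pvS]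
      rw [ih, ih (0 + pvTok u)]
      omega

lemma pvS_cons (t : List Char) (ts : List (List Char)) : pvS (t :: ts) = pvTok t + pvS ts := by
  unfold pvS
  simp only [List.foldl_cons]
  rw [pvS_shift, pvS_shift]
  omega

lemma isspace_of_isdigit (c : Char) (h : PySem.Chars.isdigit c = true) :
    PySem.Chars.isspace c = false := by
  simp only [PySem.Chars.isdigit, Bool.and_eq_true, decide_eq_true_eq, Char.le_def] at h
  obtain ⟨h1, h2⟩ := h
  have h1' : 48 ≤ c.toNat := UInt32.le_iff_toNat_le.mp h1
  have h2' : c.toNat ≤ 57 := UInt32.le_iff_toNat_le.mp h2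
  simp only [PySem.Chars.isspace]
  generalize c.toNat = n at h1' h2' ⊢
  simp only [Bool.or_eq_false_iff, Bool.and_eq_false_iff, decide_eq_false_iff_not]
  omega

lemma isspace_space : PySem.Chars.isspace ' ' = true := by decide

lemma go_acc (cs : List Char) (cur : List Char) (acc : List (List Char)) :
    PySem.Chars.split₀.go cs cur acc = acc.reverse ++ PySem.Chars.split₀.go cs cur [] := by
  induction cs generalizing cur acc with
  | nil =>
      simp [PySem.Chars.split₀.go]
      split_ifs <;> simp
  | cons c rest ih =>
      simp only [PySem.Chars.split₀.go]
      by_cases hs : PySem.Chars.isspace c = true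
      · simp only [hs, if_true]
        by_cases he : cur.isEmpty = true
        · simp [he, ih [] acc]
        · simp only [he]
          rw [ih [] (cur.reverse :: acc), ih [] (cur.reverse :: [])]
          simp
      · simp only [hs]
        exact ih (c :: cur) acc

lemma main_inv (cs : List Char) (cur : List Char) (count : Int) :
    pvLoopA cs cur count = count + pvS (PySem.Chars.split₀.go (cs.map pvF) cur.reverse []) := by
  induction cs generalizing cur count with
  | nil =>
      simp only [List.map_nil, pvLoopA, PySem.Chars.split₀.go]
      by_cases he : cur.isEmpty = true
      · simp [List.isEmpty_iff.mp he, pvS]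
      · have : cur.reverse.isEmpty = false := by
          simp_all [List.isEmpty_iff]
        simp only [he, this, List.reverse_reverse]
        rw [pvTok_eq_match cur count]
        simp [pvS]
  | cons c rest ih =>
      simp only [List.map_cons, pvLoopA, pvF]
      by_cases hd : PySem.Chars.isdigit c = true
      · simp only [hd, if_true, PySem.Chars.split₀.go, isspace_of_isdigit c hd]
        rw [ih (cur ++ [c]) count]
        simp
      · simp only [hd, PySem.Chars.split₀.go]
        by_cases he : cur.isEmpty = true
        · have : cur = [] := List.isEmpty_iff.mp he
          subst this
          simp only [he, if_true, List.reverse_nil]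
          exact ih [] count
        · have : cur.reverse.isEmpty = false := by simp_all [List.isEmpty_iff]
          simp only [he, this, List.reverse_reverse]
          rw [ih [] _, go_acc _ [] [cur], pvTok_eq_match cur count]
          simp [isspace_space, pvS_cons]
          omega

lemma alt_eq_pvS (s : String) :
    count_numbers_less_than_five_alt s = pvS (PySem.Chars.split₀ (s.toList.map pvF)) := by
  unfold count_numbers_less_than_five_alt pvS pvTok pvF
  simp [PySem.Str.split₀, PySem.Int.ofStr?, List.foldl_map]

-- ===== VERDICT (by name: the statement is the Claim_ definition above) =====
theorem count_numbers_less_than_five_spec : Claim_equal_count_numbers_less_than_five := by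
  intro s _
  unfold Spec_count_numbers_less_than_five count_numbers_less_than_five
  rw [alt_eq_pvS, main_inv]
  simp [PySem.Chars.split₀]
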